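-- pv_equiv track=rewrite | github.com/nicolascarrizook/api-rag | rag-system/scripts/rag_indexer.py | _detect_meal_type
-- ===== SOURCE A (Python) =====
-- def _detect_meal_type(filename: str, text: str) -> str:
--     """Detecta tipo de comida basado en archivo y contenido"""
--     filename_lower = filename.lower()
--     text_lower = text.lower()
--
--     if 'desayuno' in filename_lower or any(word in text_lower for word in ['desayuno', 'mañana', 'café']):
--         return 'desayuno'
--     elif 'almuerzo' in filename_lower or any(word in text_lower for word in ['almuerzo', 'mediodía']):
--         return 'almuerzo'
--     elif 'merienda' in filename_lower or any(word in text_lower for word in ['merienda', 'tarde']):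
--         return 'merienda'
--     elif 'cena' in filename_lower or any(word in text_lower for word in ['cena', 'noche']):
--         return 'cena'
--     else:
--         return 'general'
-- ===== SOURCE B (Python) =====
-- _LABELS = ['desayuno', 'almuerzo', 'merienda', 'cena', 'general']
--
-- _FN_KEYWORDS = [('desayuno', 0), ('almuerzo', 1), ('merienda', 2), ('cena', 3)]
--
-- _TEXT_KEYWORDS = [('desayuno', 0), ('ma\u00f1ana', 0), ('caf\u00e9', 0),
--                   ('almuerzo', 1), ('mediod\u00eda', 1),
--                   ('merienda', 2), ('tarde', 2),
--                   ('cena', 3), ('noche', 3)]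
--
--
-- def _detect_meal_type(filename: str, text: str) -> str:
--     fl = filename.lower()
--     tl = text.lower()
--     best = 4  # priority accumulator; 4 = 'general'
--     for kw, p in _FN_KEYWORDS:
--         if p < best and kw in fl:
--             best = p
--     for kw, p in _TEXT_KEYWORDS:
--         if p < best and kw in tl:
--             best = p
--     return _LABELS[best]
-- ===== Notes on version B (the rewrite author's own statement) =====
-- stated objective: alternative
-- what changed: Replaces A's first-match if/elif cascade (early return per branch) with a single-pass min-priority accumulator folded over two keyword tables, then indexes a label array with the resulting minimum priority.
import Mathlib
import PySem

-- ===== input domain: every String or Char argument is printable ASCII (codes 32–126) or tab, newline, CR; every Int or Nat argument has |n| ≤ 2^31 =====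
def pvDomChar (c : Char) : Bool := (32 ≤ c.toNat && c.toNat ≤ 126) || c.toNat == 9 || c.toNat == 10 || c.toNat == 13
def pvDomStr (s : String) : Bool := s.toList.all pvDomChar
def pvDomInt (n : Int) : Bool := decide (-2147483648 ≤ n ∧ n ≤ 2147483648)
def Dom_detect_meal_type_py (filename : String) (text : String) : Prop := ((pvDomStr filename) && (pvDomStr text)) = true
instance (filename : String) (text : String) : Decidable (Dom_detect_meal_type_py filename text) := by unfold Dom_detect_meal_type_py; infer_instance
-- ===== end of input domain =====

-- B replaces A's first-match if/elif cascade by a min-priority accumulator folded over keyword tables, then indexes a label array (alternative decomposition; same cost).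

-- ===== PORT A =====
-- literal transliteration of the if/elif chain; 'w in s' is PySem.Str.isIn, any(...) is List.any
def detect_meal_type_py (filename : String) (text : String) : String :=
  let filename_lower := PySem.Str.lower filename
  let text_lower := PySem.Str.lower text
  if PySem.Str.isIn "desayuno" filename_lower
      || (["desayuno", "mañana", "café"].any fun word => PySem.Str.isIn word text_lower) then
    "desayuno"
  else if PySem.Str.isIn "almuerzo" filename_lower
      || (["almuerzo", "mediodía"].any fun word => PySem.Str.isIn word text_lower) then
    "almuerzo"
  else if PySem.Str.isIn "merienda" filename_lower
      || (["merienda", "tarde"].any fun word => PySem.Str.isIn word text_lower) then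
    "merienda"
  else if PySem.Str.isIn "cena" filename_lower
      || (["cena", "noche"].any fun word => PySem.Str.isIn word text_lower) then
    "cena"
  else
    "general"

-- ===== PORT B =====
def pvLabels : List String := ["desayuno", "almuerzo", "merienda", "cena", "general"]

def pvFnKeywords : List (String × Nat) :=
  [("desayuno", 0), ("almuerzo", 1), ("merienda", 2), ("cena", 3)]

def pvTextKeywords : List (String × Nat) :=
  [("desayuno", 0), ("mañana", 0), ("café", 0),
   ("almuerzo", 1), ("mediodía", 1),
   ("merienda", 2), ("tarde", 2),
   ("cena", 3), ("noche", 3)]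

-- the two accumulator loops ('if p < best and kw in s: best = p') as folds, then _LABELS[best];
-- best ≤ 4 < 5 = len(_LABELS) always, so the getD default is unreachable
def detect_meal_type_py_alt (filename : String) (text : String) : String :=
  let fl := PySem.Str.lower filename
  let tl := PySem.Str.lower text
  let best :=
    pvFnKeywords.foldl (fun best kp => if kp.2 < best then (if PySem.Str.isIn kp.1 fl then kp.2 else best) else best) 4
  let best :=
    pvTextKeywords.foldl (fun best kp => if kp.2 < best then (if PySem.Str.isIn kp.1 tl then kp.2 else best) else best) best
  pvLabels.getD best "general"

-- ===== PRECONDITION & SPEC =====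
def Spec_detect_meal_type_py (filename : String) (text : String) (out : String) : Prop := out = detect_meal_type_py_alt filename text
instance (filename : String) (text : String) (out : String) : Decidable (Spec_detect_meal_type_py filename text out) := by unfold Spec_detect_meal_type_py; infer_instance

-- ===== CLAIM =====
def Claim_equal_detect_meal_type_py : Prop := ∀ (filename : String) (text : String), Dom_detect_meal_type_py filename text → Spec_detect_meal_type_py filename text (detect_meal_type_py filename text)

-- ===== LEMMAS AND PROOFS =====
-- Both sides are built from the same 13 substring tests; generalize them to Bools and decide.
theorem detect_meal_type_core (a b c d e f g h i j k l m : Bool) :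
    (if a || (e || (f || (g || false))) then "desayuno"
     else if b || (h || (i || false)) then "almuerzo"
     else if c || (j || (k || false)) then "merienda"
     else if d || (l || (m || false)) then "cena"
     else "general") =
    (let best : Nat :=
       [( a, 0), (b, 1), (c, 2), (d, 3)].foldl
         (fun best kp => if kp.2 < best then (if kp.1 then kp.2 else best) else best) 4
     let best : Nat :=
       [(e, 0), (f, 0), (g, 0), (h, 1), (i, 1), (j, 2), (k, 2), (l, 3), (m, 3)].foldl
         (fun best kp => if kp.2 < best then (if kp.1 then kp.2 else best) else best) best
     pvLabels.getD best "general") := by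
  revert a b c d e f g h i j k l m
  decide

-- ===== VERDICT =====
set_option maxHeartbeats 1000000 in
theorem detect_meal_type_py_spec : Claim_equal_detect_meal_type_py := by
  intro filename text _
  unfold Spec_detect_meal_type_py detect_meal_type_py detect_meal_type_py_alt pvFnKeywords pvTextKeywords
  exact detect_meal_type_core
    (PySem.Str.isIn "desayuno" (PySem.Str.lower filename))
    (PySem.Str.isIn "almuerzo" (PySem.Str.lower filename))
    (PySem.Str.isIn "merienda" (PySem.Str.lower filename))
    (PySem.Str.isIn "cena" (PySem.Str.lower filename))
    (PySem.Str.isIn "desayuno" (PySem.Str.lower text))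
    (PySem.Str.isIn "mañana" (PySem.Str.lower text))
    (PySem.Str.isIn "café" (PySem.Str.lower text))
    (PySem.Str.isIn "almuerzo" (PySem.Str.lower text))
    (PySem.Str.isIn "mediodía" (PySem.Str.lower text))
    (PySem.Str.isIn "merienda" (PySem.Str.lower text))
    (PySem.Str.isIn "tarde" (PySem.Str.lower text))
    (PySem.Str.isIn "cena" (PySem.Str.lower text))
    (PySem.Str.isIn "noche" (PySem.Str.lower text))
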